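-- pv_equiv track=rewrite | github.com/mattachu/Scripts | process_notebooks.py | _title
-- ===== SOURCE A (Python) =====
-- def _title(text, title_level=1):
--     if not isinstance(text, str):
--         raise ValueError(f'Text for title is not a string: {text}')
--     elif text == '':
--         raise ValueError('Text for title is empty.')
--     if not isinstance(title_level, int):
--         raise ValueError(f'Level for title is not an integer: {title_level}')
--     elif title_level < 1:
--         raise ValueError(f'Level for title is less than one: {title_level}')
--     while text.startswith('#') or text.startswith('* ') or text.startswith(' '):
--         text = text[1:]
--     return '#' * title_level + ' ' + text
-- ===== SOURCE B (Python) =====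
-- import re
--
-- def _title(text, title_level=1):
--     if not isinstance(text, str):
--         raise ValueError(f'Text for title is not a string: {text}')
--     elif text == '':
--         raise ValueError('Text for title is empty.')
--     if not isinstance(title_level, int):
--         raise ValueError(f'Level for title is not an integer: {title_level}')
--     elif title_level < 1:
--         raise ValueError(f'Level for title is less than one: {title_level}')
--     return '#' * title_level + ' ' + re.sub(r'^(?:#|\* | )+', '', text)
-- ===== Notes on version B (the rewrite author's own statement) =====
-- stated objective: idiomatic
-- what changed: The char-by-char while loop that strips leading '#', ' ' and '* ' is replaced by a single anchored regex substitution re.sub(r'^(?:#|\* | )+', '', text).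
import Mathlib
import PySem

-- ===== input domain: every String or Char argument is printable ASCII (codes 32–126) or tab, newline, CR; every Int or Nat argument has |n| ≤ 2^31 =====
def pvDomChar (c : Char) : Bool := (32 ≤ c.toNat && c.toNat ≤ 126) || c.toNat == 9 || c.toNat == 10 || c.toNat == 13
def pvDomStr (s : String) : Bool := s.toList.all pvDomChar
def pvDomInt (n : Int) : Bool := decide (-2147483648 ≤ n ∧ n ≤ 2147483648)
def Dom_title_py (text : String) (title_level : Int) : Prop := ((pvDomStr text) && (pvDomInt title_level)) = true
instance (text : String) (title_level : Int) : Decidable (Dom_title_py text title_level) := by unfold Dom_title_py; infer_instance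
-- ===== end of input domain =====

-- B replaces A's char-by-char while loop with one anchored regex substitution (same output, similar cost).


-- ===== PORT A =====
-- A's while loop: while text startswith '#' or '* ' or ' ', drop ONE leading char.
def stripLoopA : List Char → List Char
  | [] => []
  | c :: rest =>
      if c = '#' ∨ (c = '*' ∧ rest.head? = some ' ') ∨ c = ' ' then stripLoopA rest
      else c :: rest

def title_py (text : String) (_title_level : Int) : String :=
  String.mk (List.replicate _title_level.toNat '#' ++ ' ' :: stripLoopA text.toList)

-- ===== PORT B =====
-- Hand port of the anchored regex ^(?:#|\* | )+ : greedily consume leading '#', '* ' (as a pair) or ' '.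
def regexMunchB : List Char → List Char
  | '#' :: rest => regexMunchB rest
  | '*' :: ' ' :: rest => regexMunchB rest
  | ' ' :: rest => regexMunchB rest
  | cs => cs

def title_py_alt (text : String) (title_level : Int) : String :=
  String.mk (List.replicate title_level.toNat '#' ++ ' ' :: regexMunchB text.toList)

-- ===== PRECONDITION & SPEC =====
-- A raises ValueError on empty text and on title_level < 1; those inputs are excluded.
def Pre_title_py (text : String) (title_level : Int) : Prop := text ≠ "" ∧ 1 ≤ title_level
instance (text : String) (title_level : Int) : Decidable (Pre_title_py text title_level) := by unfold Pre_title_py; infer_instance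
def pvWitness_title_py : String × Int := ("## *hello", 2)

def Spec_title_py (text : String) (title_level : Int) (out : String) : Prop := out = title_py_alt text title_level
instance (text : String) (title_level : Int) (out : String) : Decidable (Spec_title_py text title_level out) := by unfold Spec_title_py; infer_instance

-- ===== CLAIM (what is proved, stated in full; the proofs are below) =====
def Claim_equal_title_py : Prop := ∀ (text : String) (title_level : Int), Dom_title_py text title_level → Pre_title_py text title_level → Spec_title_py text title_level (title_py text title_level)

-- ===== LEMMAS AND PROOFS =====
theorem strip_eq_munch : ∀ cs : List Char, stripLoopA cs = regexMunchB cs := by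
  intro cs
  induction cs with
  | nil => rfl
  | cons c rest ih =>
    by_cases hH : c = '#'
    · subst hH; simpa [stripLoopA, regexMunchB] using ih
    by_cases hsp : c = ' '
    · subst hsp; simpa [stripLoopA, regexMunchB] using ih
    by_cases hst : c = '*' ∧ rest.head? = some ' '
    · obtain ⟨hc, hh⟩ := hst
      subst hc
      cases rest with
      | nil => simp at hh
      | cons d rest' =>
        simp at hh; subst hh
        have h1 : stripLoopA (' ' :: rest') = regexMunchB (' ' :: rest') := ih
        have h2 : stripLoopA (' ' :: rest') = stripLoopA rest' := by simp [stripLoopA]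
        have h3 : regexMunchB (' ' :: rest') = regexMunchB rest' := by rfl
        have h4 : stripLoopA ('*' :: ' ' :: rest') = stripLoopA (' ' :: rest') := by
          simp [stripLoopA]
        have h5 : regexMunchB ('*' :: ' ' :: rest') = regexMunchB rest' := by rfl
        rw [h4, h1, h3, h5]
    · -- no alternative matches: both stop
      have hA : stripLoopA (c :: rest) = c :: rest := by
        rw [stripLoopA, if_neg]; tauto
      have hB : regexMunchB (c :: rest) = c :: rest := by
        rw [regexMunchB.eq_def]
        split
        · simp_all
        · rename_i heq; injection heq with h1 h2
          exact absurd ⟨h1, by simp [h2]⟩ hst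
        · simp_all
        · rfl
      rw [hA, hB]

-- ===== VERDICT (by name: the statement is the Claim_ definition above) =====
theorem title_py_spec : Claim_equal_title_py := by
  intro text title_level _ _
  unfold Spec_title_py title_py title_py_alt
  rw [strip_eq_munch]
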